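-- pv_equiv track=rewrite | github.com/zyzfred/BU-CS-521 | HW6/Function-cmd_k.py | cmd_k
-- ===== SOURCE A (Python) =====
-- def cmd_k(x, pos):
--   # split two n lines
--   l = x.split('\n')
--   remain = pos
--   # know which line it is
--   line_number, remain = find_line_helper(l, remain)
--   # if not last line
--   if line_number < len(l) - 1:
--     # init pos to 0
--     pos = 0
--     # plus each line
--     for i in range(line_number + 1):
--       pos = pos + len(l[i]) + 1
--     # plus remain
--     if remain > len(l[line_number + 1]):
--       pos = pos + len(l[line_number + 1])
--     else:
--       pos += remain
--
--     return x, pos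
--   else:
--     return x, pos
--
-- def find_line_helper(l, remain):
--
--   line_number = 0
--   # find line number
--   while remain > len(l[line_number]):
--     remain = remain - len(l[line_number]) - 1
--     line_number += 1
--
--   return line_number, remain
-- ===== SOURCE B (Python) =====
-- def cmd_k(x, pos):
--     p = max(pos, 0)
--     e = x.find('\n', p)          # end of the current line
--     if e == -1:
--         return x, pos            # already on the last line
--     start = x.rfind('\n', 0, p) + 1   # start of the current line
--     col = pos - start
--     e2 = x.find('\n', e + 1)
--     next_len = (e2 if e2 != -1 else len(x)) - (e + 1)
--     return x, e + 1 + min(col, next_len)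
-- ===== Notes on version B (the rewrite author's own statement) =====
-- stated objective: alternative
-- what changed: B never splits the text into lines and has no loop over lines: it locates the current line's end with x.find('\n', pos) and its start with x.rfind('\n', 0, pos), then computes the new position by O(1) index arithmetic, where A splits on newlines, walks the line list to find the line, and re-sums line lengths in a second pass.
import Mathlib
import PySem

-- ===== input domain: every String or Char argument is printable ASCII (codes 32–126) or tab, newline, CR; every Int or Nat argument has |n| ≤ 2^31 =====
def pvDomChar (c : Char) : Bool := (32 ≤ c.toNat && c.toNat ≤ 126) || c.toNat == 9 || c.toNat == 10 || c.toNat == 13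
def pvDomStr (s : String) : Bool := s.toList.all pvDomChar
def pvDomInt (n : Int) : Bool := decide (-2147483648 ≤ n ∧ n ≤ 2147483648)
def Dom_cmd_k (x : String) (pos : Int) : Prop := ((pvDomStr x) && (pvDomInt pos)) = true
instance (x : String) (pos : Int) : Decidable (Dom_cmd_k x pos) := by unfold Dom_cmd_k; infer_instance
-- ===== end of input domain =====

-- B locates the current line with find/rfind and O(1) index arithmetic instead of A's split-into-lines walk plus prefix-sum pass (objective: alternative).


-- ===== PORT A =====
-- find_line_helper: the while loop walks the line list; 'none' marks the IndexError when it runs off the end.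
def pvFindLine : List (List Char) → Int → Int → Option (Int × Int)
  | [], _, _ => none
  | s :: rest, ln, remain =>
    if remain > PySem.Chars.len s then pvFindLine rest (ln + 1) (remain - PySem.Chars.len s - 1)
    else some (ln, remain)

-- the code after the find_line_helper call (argument: its result; none = A raised, value irrelevant under Pre_)
def pvFinishA (l : List (List Char)) (x : String) (pos : Int) : Option (Int × Int) → String × Int
  | none => (x, pos)
  | some (ln, remain) =>
    if ln < PySem.List.len l - 1 then
      let pos1 := (PySem.List.pyRange 0 (ln + 1) 1).foldl
        (fun p i => p + PySem.Chars.len (PySem.List.pyGetD l i []) + 1) 0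
      let pos2 := if remain > PySem.Chars.len (PySem.List.pyGetD l (ln + 1) []) then
          pos1 + PySem.Chars.len (PySem.List.pyGetD l (ln + 1) [])
        else pos1 + remain
      (x, pos2)
    else (x, pos)

def cmd_k (x : String) (pos : Int) : String × Int :=
  let l := (PySem.Chars.split? x.toList ['\n']).getD []
  pvFinishA l x pos (pvFindLine l 0 pos)

-- ===== PORT B =====
-- Source B: two substring searches and index arithmetic; no split, no loop
def cmd_k_alt (x : String) (pos : Int) : String × Int :=
  let p := max pos 0
  let e := PySem.Str.findFrom x "\n" p none
  if e = -1 then (x, pos)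
  else
    let start := PySem.Str.rfindFrom x "\n" 0 (some p) + 1
    let col := pos - start
    let e2 := PySem.Str.findFrom x "\n" (e + 1) none
    let nextLen := (if e2 ≠ -1 then e2 else PySem.Str.len x) - (e + 1)
    (x, e + 1 + min col nextLen)

-- ===== PRECONDITION & SPEC =====
-- A raises IndexError exactly when pos > len(x); Pre_ excludes precisely those inputs.
def Pre_cmd_k (x : String) (pos : Int) : Prop := pos ≤ PySem.Str.len x
instance (x : String) (pos : Int) : Decidable (Pre_cmd_k x pos) := by unfold Pre_cmd_k; infer_instance
def pvWitness_cmd_k : String × Int := ("ab\ncd", 1)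

def Spec_cmd_k (x : String) (pos : Int) (out : String × Int) : Prop := out = cmd_k_alt x pos
instance (x : String) (pos : Int) (out : String × Int) : Decidable (Spec_cmd_k x pos out) := by unfold Spec_cmd_k; infer_instance

-- ===== CLAIM (what is proved, stated in full; the proofs are below) =====
def Claim_equal_cmd_k : Prop := ∀ (x : String) (pos : Int), Dom_cmd_k x pos → Pre_cmd_k x pos → Spec_cmd_k x pos (cmd_k x pos)

-- ===== LEMMAS AND PROOFS =====
def pvLines : List Char → List (List Char)
  | [] => [[]]
  | c :: t =>
    if c = '\n' then [] :: pvLines t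
    else match pvLines t with
      | [] => [[c]]
      | h :: r => (c :: h) :: r
def pvJoin : List (List Char) → List Char
  | [] => []
  | [u] => u
  | u :: r => u ++ '\n' :: pvJoin r
def pvSumLen (l : List (List Char)) : Int := (l.map (fun s => (s.length : Int) + 1)).sum
lemma pvLines_ne_nil (cs : List Char) : pvLines cs ≠ [] := by
  cases cs with
  | nil => simp [pvLines]
  | cons c t =>
    simp only [pvLines]
    split_ifs
    · simp
    · cases h : pvLines t <;> simp

lemma pvLines_no_nl (cs : List Char) : ∀ u ∈ pvLines cs, '\n' ∉ u := by
  induction cs with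
  | nil => simp [pvLines]
  | cons c t ih =>
    simp only [pvLines]
    split_ifs with hc
    · intro u hu
      rcases List.mem_cons.1 hu with h | h
      · simp [h]
      · exact ih u h
    · cases h : pvLines t with
      | nil => exact absurd h (pvLines_ne_nil t)
      | cons hd r =>
        intro u hu
        rcases List.mem_cons.1 hu with h1 | h1
        · subst h1
          intro hm
          rcases List.mem_cons.1 hm with h2 | h2
          · exact hc h2.symm
          · exact ih hd (by simp [h]) h2
        · exact ih u (by simp [h, h1])

lemma pvJoin_pvLines (cs : List Char) : pvJoin (pvLines cs) = cs := by
  induction cs with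
  | nil => simp [pvLines, pvJoin]
  | cons c t ih =>
    simp only [pvLines]
    split_ifs with hc
    · subst hc
      cases h : pvLines t with
      | nil => exact absurd h (pvLines_ne_nil t)
      | cons hd r =>
        have e : pvJoin ([] :: hd :: r) = '\n' :: pvJoin (hd :: r) := rfl
        rw [e, ← h, ih]
    · cases h : pvLines t with
      | nil => exact absurd h (pvLines_ne_nil t)
      | cons hd r =>
        rw [h] at ih
        cases r with
        | nil => simp [pvJoin] at ih ⊢; exact ih
        | cons v r' => simp [pvJoin] at ih ⊢; exact ih

lemma pvJoin_len (L : List (List Char)) (h : L ≠ []) : ((pvJoin L).length : Int) = pvSumLen L - 1 := by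
  induction L with
  | nil => simp at h
  | cons u r ih =>
    cases r with
    | nil => simp [pvJoin, pvSumLen]
    | cons v r' =>
      have := ih (by simp)
      simp [pvJoin, pvSumLen] at this ⊢
      omega

lemma pvJoin_decomp (pre : List (List Char)) (cur : List Char) (suf : List (List Char)) :
    pvJoin (pre ++ cur :: suf) = pre.flatMap (fun u => u ++ ['\n']) ++ pvJoin (cur :: suf) := by
  induction pre with
  | nil => simp
  | cons u pre' ih =>
    have hne : pre' ++ cur :: suf ≠ [] := by simp
    cases h : pre' ++ cur :: suf with
    | nil => exact absurd h hne
    | cons w r =>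
      show pvJoin (u :: (pre' ++ cur :: suf)) = _
      rw [h]
      show u ++ '\n' :: pvJoin (w :: r) = _
      rw [← h, ih]
      simp
def pvPre (a : List Char) : List (List Char) → List (List Char)
  | [] => [a]
  | h :: r => (a ++ h) :: r
lemma pvPre_pvPre (a b : List Char) (L : List (List Char)) :
    pvPre a (pvPre b L) = pvPre (a ++ b) L := by
  cases L <;> simp [pvPre]

lemma pvSplitOn_go_spec (l : List Char) : ∀ (fuel : Nat) (cur : List Char) (acc : List (List Char)),
    l.length ≤ fuel →
    PySem.Chars.splitOn.go ['\n'] fuel l cur acc = acc.reverse ++ pvPre cur.reverse (pvLines l) := by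
  induction l with
  | nil =>
    intro fuel cur acc _
    cases fuel <;> simp [PySem.Chars.splitOn.go, pvLines, pvPre]
  | cons c rest ih =>
    intro fuel cur acc hf
    cases fuel with
    | zero => simp at hf
    | succ f =>
      by_cases hc : c = '\n'
      · subst hc
        have hpref : ['\n'].isPrefixOf ('\n' :: rest) = true := by simp [List.isPrefixOf]
        rw [show PySem.Chars.splitOn.go ['\n'] (f+1) ('\n' :: rest) cur acc
              = PySem.Chars.splitOn.go ['\n'] f rest [] (cur.reverse :: acc) by
            simp [PySem.Chars.splitOn.go, hpref]]
        rw [ih f [] (cur.reverse :: acc) (by simp at hf ⊢; omega)]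
        simp [pvLines, pvPre]
        cases h : pvLines rest with
        | nil => exact absurd h (pvLines_ne_nil rest)
        | cons hd r => simp
      · have hpref : ['\n'].isPrefixOf (c :: rest) = false := by
          simp [List.isPrefixOf]; exact fun h => hc h.symm
        rw [show PySem.Chars.splitOn.go ['\n'] (f+1) (c :: rest) cur acc
              = PySem.Chars.splitOn.go ['\n'] f rest (c :: cur) acc by
            simp [PySem.Chars.splitOn.go, hpref]]
        rw [ih f (c :: cur) acc (by simp at hf ⊢; omega)]
        have : pvLines (c :: rest) = pvPre [c] (pvLines rest) := by
          simp only [pvLines, hc, if_false]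
          cases h : pvLines rest with
          | nil => exact absurd h (pvLines_ne_nil rest)
          | cons hd r => simp [pvPre]
        rw [this, pvPre_pvPre]
        simp

lemma pvSplitOn_eq (cs : List Char) : PySem.Chars.splitOn cs ['\n'] = pvLines cs := by
  rw [PySem.Chars.splitOn, pvSplitOn_go_spec cs (cs.length + 1) [] [] (by omega)]
  cases h : pvLines cs with
  | nil => exact absurd h (pvLines_ne_nil cs)
  | cons hd r => simp [pvPre]

lemma pvSingle_pref (c : Char) (t : List Char) : ([c] <+: t) ↔ t[0]? = some c := by
  cases t with
  | nil => simp
  | cons a r =>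
    constructor
    · rintro ⟨s, hs⟩
      simp at hs
      simp [hs.1]
    · intro h
      simp at h
      exact ⟨r, by simp [h]⟩

lemma pvSingle_infix (c : Char) (s : List Char) : ([c] <:+: s) ↔ c ∈ s := by
  constructor
  · intro h
    exact h.subset (by simp)
  · intro h
    rcases List.append_of_mem h with ⟨u, v, rfl⟩
    exact ⟨u, v, by simp⟩

lemma pvFind_no (c : Char) (s : List Char) (h : c ∉ s) : PySem.Chars.find s [c] = -1 := by
  rw [PySem.Chars.find_eq_neg_one_iff, pvSingle_infix]
  exact h

lemma pvFind_at (c : Char) (u v : List Char) (h : c ∉ u) :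
    PySem.Chars.find (u ++ c :: v) [c] = (u.length : Int) := by
  have hnn : 0 ≤ PySem.Chars.find (u ++ c :: v) [c] := by
    rw [PySem.Chars.find_nonneg_iff, pvSingle_infix]
    simp
  obtain ⟨hpre, hmin⟩ := PySem.Chars.find_spec (s := u ++ c :: v) (sub := [c]) hnn
  set i := (PySem.Chars.find (u ++ c :: v) [c]).toNat with hi
  have hcast : PySem.Chars.find (u ++ c :: v) [c] = (i : Int) := by omega
  rw [hcast]
  congr 1
  rw [pvSingle_pref] at hpre
  rw [List.getElem?_drop] at hpre
  by_cases hgt : u.length < i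
  · exfalso
    have := hmin u.length hgt
    rw [pvSingle_pref, List.getElem?_drop, Nat.add_zero] at this
    exact this (by simp)
  · by_cases hlt : i < u.length
    · exfalso
      rw [Nat.add_zero] at hpre
      have : (u ++ c :: v)[i]? = u[i]? := by
        rw [List.getElem?_append_left hlt]
      rw [this] at hpre
      exact h (List.mem_of_getElem? hpre)
    · omega

lemma pvRgo_eq_zero (s sub : List Char) :
    PySem.Chars.rfind.go s sub 0 = if sub.isPrefixOf s then 0 else -1 := rfl

lemma pvRgo_eq_succ (s sub : List Char) (j : Nat) :
    PySem.Chars.rfind.go s sub (j+1) =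
      if sub.isPrefixOf (List.drop (j+1) s) then ((j:Int)+1) else PySem.Chars.rfind.go s sub j := rfl

lemma pvPrefixOf_iff (c : Char) (t : List Char) : [c].isPrefixOf t = true ↔ t[0]? = some c := by
  rw [List.isPrefixOf_iff_prefix, pvSingle_pref]

lemma pvRgo_no (c : Char) (s : List Char) : ∀ (j : Nat), (∀ i, i ≤ j → s[i]? ≠ some c) →
    PySem.Chars.rfind.go s [c] j = -1 := by
  intro j
  induction j with
  | zero =>
    intro hn
    rw [pvRgo_eq_zero]
    have : ¬ [c].isPrefixOf s = true := by
      rw [pvPrefixOf_iff]; exact hn 0 le_rfl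
    simp [this]
  | succ j ih =>
    intro hn
    rw [pvRgo_eq_succ]
    have : ¬ [c].isPrefixOf (List.drop (j+1) s) = true := by
      rw [pvPrefixOf_iff, List.getElem?_drop, Nat.add_zero]
      exact hn (j+1) le_rfl
    simp only [this]
    exact ih (fun i hi => hn i (by omega))

lemma pvRgo_at (c : Char) (s : List Char) (i : Nat) (hi : s[i]? = some c) : ∀ (j : Nat), i ≤ j →
    (∀ k, i < k → k ≤ j → s[k]? ≠ some c) → PySem.Chars.rfind.go s [c] j = (i : Int) := by
  intro j
  induction j with
  | zero =>
    intro hij _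
    interval_cases i
    rw [pvRgo_eq_zero]
    have : [c].isPrefixOf s = true := by rw [pvPrefixOf_iff]; exact hi
    simp [this]
  | succ j ih =>
    intro hij hk
    rw [pvRgo_eq_succ]
    by_cases he : i = j + 1
    · subst he
      have hp : [c].isPrefixOf (List.drop (j+1) s) = true := by
        rw [pvPrefixOf_iff, List.getElem?_drop, Nat.add_zero]; exact hi
      simp only [hp, if_true]
      omega
    · have hij' : i ≤ j := by omega
      have : ¬ [c].isPrefixOf (List.drop (j+1) s) = true := by
        rw [pvPrefixOf_iff, List.getElem?_drop, Nat.add_zero]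
        exact hk (j+1) (by omega) le_rfl
      simp only [this]
      exact ih hij' (fun k h1 h2 => hk k h1 (by omega))

lemma pvRfind_no (c : Char) (s : List Char) (h : c ∉ s) : PySem.Chars.rfind s [c] = -1 := by
  rw [PySem.Chars.rfind]
  exact pvRgo_no c s s.length (fun i _ hm => h (List.mem_of_getElem? hm))

lemma pvRfind_at (c : Char) (u v : List Char) (h : c ∉ v) :
    PySem.Chars.rfind (u ++ c :: v) [c] = (u.length : Int) := by
  rw [PySem.Chars.rfind]
  apply pvRgo_at
  · simp
  · simp
  · intro k h1 _ hm
    have : (u ++ c :: v)[k]? = (c :: v)[k - u.length]? := by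
      rw [List.getElem?_append_right (by omega)]
    rw [this] at hm
    have hk : k - u.length ≥ 1 := by omega
    rw [show (c :: v)[k - u.length]? = v[k - u.length - 1]? by
      cases hq : k - u.length with
      | zero => omega
      | succ m => simp] at hm
    exact h (List.mem_of_getElem? hm)

lemma pvRfindFrom_take (s sub : List Char) (p : Int) (h0 : 0 ≤ p) (hl : p ≤ (s.length : Int)) :
    PySem.Chars.rfindFrom s sub 0 (some p) = PySem.Chars.rfind (s.take p.toNat) sub := by
  rw [PySem.Chars.rfindFrom]
  split_ifs with h1 h2 h3 h4 h5 <;>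
    first
      | omega
      | (simp only [Int.toNat_zero, List.drop_zero]
         by_cases h : PySem.Chars.rfind (s.take p.toNat) sub = -1 <;> simp [h])
lemma pvFindLine_shift (L : List (List Char)) : ∀ (k r : Int),
    pvFindLine L k r = (pvFindLine L 0 r).map (fun q => (q.1 + k, q.2)) := by
  induction L with
  | nil => intro k r; simp [pvFindLine]
  | cons s rest ih =>
    intro k r
    simp only [pvFindLine]
    split_ifs with h
    · rw [ih (k+1), show (0:Int) + 1 = 1 by norm_num, ih 1]
      cases pvFindLine rest 0 (r - PySem.Chars.len s - 1) <;> simp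
      ring
    · simp

lemma pvFindLine_spec (L : List (List Char)) : ∀ (pos : Int), L ≠ [] → pos ≤ pvSumLen L - 1 →
    ∃ pre cur suf, L = pre ++ cur :: suf ∧
      pvFindLine L 0 pos = some ((pre.length : Int), pos - pvSumLen pre) ∧
      pos - pvSumLen pre ≤ (cur.length : Int) ∧ (pre = [] ∨ 0 ≤ pos - pvSumLen pre) := by
  induction L with
  | nil => intro pos h; simp at h
  | cons cur0 rest ih =>
    intro pos _ hle
    by_cases h : pos ≤ (cur0.length : Int)
    · refine ⟨[], cur0, rest, by simp, ?_, by simpa [pvSumLen] using h, Or.inl rfl⟩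
      simp [pvFindLine, pvSumLen]
      omega
    · have hrest : rest ≠ [] := by
        intro he
        subst he
        simp [pvSumLen] at hle
        omega
      have hle' : pos - (cur0.length : Int) - 1 ≤ pvSumLen rest - 1 := by
        simp [pvSumLen] at hle ⊢
        omega
      obtain ⟨pre', cur, suf, hdec, hfl, hrem, hnn⟩ := ih (pos - (cur0.length:Int) - 1) hrest hle'
      refine ⟨cur0 :: pre', cur, suf, by simp [hdec], ?_, ?_, ?_⟩
      · have : pvFindLine (cur0 :: rest) 0 pos
            = pvFindLine rest 1 (pos - (cur0.length:Int) - 1) := by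
          simp only [pvFindLine, PySem.Chars.len_eq]
          rw [if_pos (by omega), show (0:Int) + 1 = 1 by norm_num]
        rw [this, pvFindLine_shift, hfl]
        simp [pvSumLen]
        ring
      · simp [pvSumLen] at hrem ⊢
        omega
      · right
        rcases hnn with h1 | h1
        · subst h1
          simp [pvSumLen] at *
          omega
        · simp [pvSumLen] at h1 ⊢
          omega

lemma pvRangeSum (pre rest : List (List Char)) :
    (PySem.List.pyRange 0 (pre.length : Int) 1).foldl
      (fun p i => p + PySem.Chars.len (PySem.List.pyGetD (pre ++ rest) i []) + 1) 0 = pvSumLen pre := by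
  rw [PySem.List.foldl_congr_mem _ _
        (fun p i => p + PySem.Chars.len (PySem.List.pyGetD pre i []) + 1) 0
        (by
          intro acc i hi
          rw [PySem.List.mem_pyRange_one] at hi
          have h1 := PySem.List.pyGetD_eq_getElem (pre ++ rest) [] hi.1
            (by simp only [List.length_append, Nat.cast_add]; omega)
          have h2 := PySem.List.pyGetD_eq_getElem pre [] hi.1 hi.2
          show _ = acc + PySem.Chars.len (PySem.List.pyGetD pre i []) + 1
          rw [h1, h2]
          have hlt : i.toNat < pre.length := by omega
          rw [List.getElem_append_left hlt]),
      PySem.List.foldl_pyRange_zero_pyGetD' pre [] (fun p s => p + PySem.Chars.len s + 1) 0]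
  have : ∀ (a : Int) (s : List Char), a + PySem.Chars.len s + 1 = a + (PySem.Chars.len s + 1) := by
    intro a s; ring
  simp only [this]
  rw [PySem.List.foldl_add pre (fun s => PySem.Chars.len s + 1) 0]
  simp [pvSumLen]

lemma pvGetD_append_cons (q : List (List Char)) (nxt : List Char) (t : List (List Char)) :
    PySem.List.pyGetD (q ++ nxt :: t) ((q.length : Int)) [] = nxt := by
  have h := PySem.List.pyGetD_natCast (q ++ nxt :: t) q.length ([] : List Char)
  rw [h]
  simp [List.getD]

lemma pvSumLen_nonneg (l : List (List Char)) : 0 ≤ pvSumLen l := by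
  induction l with
  | nil => simp [pvSumLen]
  | cons u r ih => simp [pvSumLen] at ih ⊢; omega

lemma pvSumLen_append_singleton (a : List (List Char)) (u : List Char) :
    pvSumLen (a ++ [u]) = pvSumLen a + (u.length : Int) + 1 := by
  simp [pvSumLen]; ring

lemma pvFlat_len (pre : List (List Char)) :
    ((pre.flatMap (fun u => u ++ ['\n'])).length : Int) = pvSumLen pre := by
  induction pre with
  | nil => simp [pvSumLen]
  | cons u r ih => simp [pvSumLen] at ih ⊢; omega

lemma pvMain (x : String) (pos : Int) (h : pos ≤ (x.toList.length : Int)) :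
    cmd_k x pos = cmd_k_alt x pos := by
  have hsplit : (PySem.Chars.split? x.toList "\n".toList).getD [] = pvLines x.toList := by
    rw [show "\n".toList = ['\n'] from rfl, PySem.Chars.split?]
    simp [pvSplitOn_eq]
  obtain ⟨pre, cur, suf, hdec, hfl, hrem, hnn⟩ :=
    pvFindLine_spec (pvLines x.toList) pos (pvLines_ne_nil x.toList)
      (by rw [← pvJoin_len _ (pvLines_ne_nil x.toList), pvJoin_pvLines]; omega)
  have hsplit' : (PySem.Chars.split? x.toList ['\n']).getD [] = pvLines x.toList := by
    rw [PySem.Chars.split?]; simp [pvSplitOn_eq]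
  have hnl : ∀ u ∈ pvLines x.toList, '\n' ∉ u := pvLines_no_nl x.toList
  have hjoin : pvJoin (pvLines x.toList) = x.toList := pvJoin_pvLines x.toList
  have hcur : '\n' ∉ cur := hnl cur (by rw [hdec]; simp)
  have hS0 : 0 ≤ pvSumLen pre := pvSumLen_nonneg pre
  have hfront : x.toList = pre.flatMap (fun u => u ++ ['\n']) ++ pvJoin (cur :: suf) := by
    rw [← hjoin, hdec, pvJoin_decomp]
  have hflen : ((pre.flatMap (fun u => u ++ ['\n'])).length : Int) = pvSumLen pre := pvFlat_len pre
  have hcl0 : (0:Int) ≤ (cur.length : Int) := by positivity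
  have hp0 : (0:Int) ≤ max pos 0 := le_max_right _ _
  have hpS : pvSumLen pre ≤ max pos 0 := by
    rcases hnn with h1 | h1
    · subst h1; simp [pvSumLen]
    · omega
  have hpc : max pos 0 ≤ pvSumLen pre + (cur.length : Int) := by
    by_cases h1 : 0 ≤ pos
    · rw [max_eq_left h1]; omega
    · rw [max_eq_right (by omega)]; omega
  have hA : cmd_k x pos
      = pvFinishA (pvLines x.toList) x pos (some ((pre.length : Int), pos - pvSumLen pre)) := by
    show pvFinishA _ x pos _ = _
    rw [hsplit', hfl]
  cases suf with
  | nil =>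
    have hcs : x.toList = pre.flatMap (fun u => u ++ ['\n']) ++ cur := hfront
    have hlen : ((x.toList.length : Nat) : Int) = pvSumLen pre + (cur.length : Int) := by
      rw [hcs]; push_cast [List.length_append]; omega
    have hk : (max pos 0).toNat ≤ x.toList.length := by omega
    have hdrop : List.drop (max pos 0).toNat x.toList
        = List.drop ((max pos 0).toNat - (pre.flatMap (fun u => u ++ ['\n'])).length) cur := by
      rw [hcs, List.drop_append,
        List.drop_eq_nil_of_le (by omega), List.nil_append]
    have hfind : PySem.Chars.findFrom x.toList ['\n'] (max pos 0) none = -1 := by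
      rw [show (max pos 0) = (((max pos 0).toNat : Nat) : Int) by omega,
        PySem.Chars.findFrom_natCast _ _ _ hk, hdrop,
        pvFind_no _ _ (fun hm => hcur (List.mem_of_mem_drop hm))]
      simp
    have hLlen : (pvLines x.toList).length = pre.length + 1 := by rw [hdec]; simp
    rw [hA]
    show _ = cmd_k_alt x pos
    rw [cmd_k_alt]
    simp only [PySem.Str.findFrom_eq, show ("\n" : String).toList = ['\n'] from rfl, hfind]
    simp only [pvFinishA, PySem.List.len_eq, hLlen]
    rw [if_neg (by push_cast; omega)]
    simp
  | cons nxt suf' =>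
    have hnxt : '\n' ∉ nxt := hnl nxt (by rw [hdec]; simp)
    have hb : x.toList = pre.flatMap (fun u => u ++ ['\n']) ++ (cur ++ '\n' :: pvJoin (nxt :: suf')) := by
      rw [hfront]; rfl
    have hblen : (0:Int) ≤ ((pvJoin (nxt :: suf')).length : Int) := by positivity
    have hlen : ((x.toList.length : Nat) : Int)
        = pvSumLen pre + (cur.length : Int) + 1 + ((pvJoin (nxt :: suf')).length : Int) := by
      rw [hb]; push_cast [List.length_append, List.length_cons]; omega
    have hk : (max pos 0).toNat ≤ x.toList.length := by omega
    -- e = S + len cur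
    have hdrop : List.drop (max pos 0).toNat x.toList
        = List.drop ((max pos 0).toNat - (pre.flatMap (fun u => u ++ ['\n'])).length) cur
            ++ '\n' :: pvJoin (nxt :: suf') := by
      rw [hb, List.drop_append, List.drop_eq_nil_of_le (by omega), List.nil_append,
        List.drop_append,
        show (max pos 0).toNat - (pre.flatMap (fun u => u ++ ['\n'])).length - cur.length = 0 by omega,
        List.drop_zero]
    have hfind : PySem.Chars.findFrom x.toList ['\n'] (max pos 0) none
        = pvSumLen pre + (cur.length : Int) := by
      rw [show (max pos 0) = (((max pos 0).toNat : Nat) : Int) by omega,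
        PySem.Chars.findFrom_natCast _ _ _ hk, hdrop,
        pvFind_at _ _ _ (fun hm => hcur (List.mem_of_mem_drop hm))]
      rw [if_neg (by omega)]
      push_cast [List.length_drop]
      omega
    -- start of the current line
    have hstart : PySem.Chars.rfindFrom x.toList ['\n'] 0 (some (max pos 0)) + 1 = pvSumLen pre := by
      rw [pvRfindFrom_take _ _ _ hp0 (by omega)]
      have htake : List.take (max pos 0).toNat x.toList
          = pre.flatMap (fun u => u ++ ['\n'])
            ++ List.take ((max pos 0).toNat - (pre.flatMap (fun u => u ++ ['\n'])).length) cur := by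
        rw [hb, List.take_append, List.take_of_length_le (by omega), List.take_append,
          show (max pos 0).toNat - (pre.flatMap (fun u => u ++ ['\n'])).length - cur.length = 0 by omega,
          List.take_zero, List.append_nil]
      have hnotake : '\n' ∉ List.take ((max pos 0).toNat - (pre.flatMap (fun u => u ++ ['\n'])).length) cur :=
        fun hm => hcur (List.take_subset _ _ hm)
      rcases List.eq_nil_or_concat pre with hpre | ⟨q, u, hqu⟩
      · subst hpre
        simp only [List.flatMap_nil, List.length_nil, List.nil_append, Nat.sub_zero]
          at htake hnotake
        rw [htake, pvRfind_no _ _ hnotake]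
        simp [pvSumLen]
      · rw [List.concat_eq_append] at hqu
        subst hqu
        rw [htake]
        rw [show (q ++ [u]).flatMap (fun u => u ++ ['\n'])
              ++ List.take ((max pos 0).toNat - ((q ++ [u]).flatMap (fun u => u ++ ['\n'])).length) cur
            = (q.flatMap (fun u => u ++ ['\n']) ++ u)
              ++ '\n' :: List.take ((max pos 0).toNat - ((q ++ [u]).flatMap (fun u => u ++ ['\n'])).length) cur by
          simp]
        rw [pvRfind_at _ _ _ hnotake]
        have hflq : ((q ++ [u]).flatMap (fun w => w ++ ['\n'])).length
            = (q.flatMap (fun w => w ++ ['\n'])).length + u.length + 1 := by simp; omega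
        rw [← hflen]
        push_cast [List.length_append]
        omega
    -- end of the next line
    have hdrop2 : List.drop ((pre.flatMap (fun u => u ++ ['\n'])).length + cur.length + 1) x.toList
        = pvJoin (nxt :: suf') := by
      rw [hb, List.drop_append, List.drop_eq_nil_of_le (by omega), List.nil_append,
        List.drop_append,
        show (pre.flatMap (fun u => u ++ ['\n'])).length + cur.length + 1
              - (pre.flatMap (fun u => u ++ ['\n'])).length = cur.length + 1 by omega,
        List.drop_eq_nil_of_le (by omega)]
      simp
    have hcast2 : pvSumLen pre + (cur.length : Int) + 1
        = (((pre.flatMap (fun u => u ++ ['\n'])).length + cur.length + 1 : Nat) : Int) := by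
      push_cast; omega
    have hnext : (if PySem.Chars.findFrom x.toList ['\n'] (pvSumLen pre + (cur.length : Int) + 1) none ≠ -1
          then PySem.Chars.findFrom x.toList ['\n'] (pvSumLen pre + (cur.length : Int) + 1) none
          else (x.toList.length : Int)) - (pvSumLen pre + (cur.length : Int) + 1)
        = (nxt.length : Int) := by
      rw [hcast2, PySem.Chars.findFrom_natCast _ _ _ (by omega), hdrop2]
      cases suf' with
      | nil =>
        rw [show pvJoin [nxt] = nxt from rfl, pvFind_no _ _ hnxt]
        rw [show pvJoin [nxt] = nxt from rfl] at hlen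
        rw [if_pos rfl, if_neg (by simp)]
        push_cast
        omega
      | cons v r =>
        rw [show pvJoin (nxt :: v :: r) = nxt ++ '\n' :: pvJoin (v :: r) from rfl,
          pvFind_at _ _ _ hnxt]
        rw [if_neg (show ¬((nxt.length : Int) = -1) by omega)]
        rw [if_pos (show (((pre.flatMap (fun u => u ++ ['\n'])).length + cur.length + 1 : Nat) : Int)
              + (nxt.length : Int) ≠ -1 by push_cast; omega)]
        push_cast
        omega
    -- A side closed form
    have hA2 : pvFinishA (pvLines x.toList) x pos (some ((pre.length : Int), pos - pvSumLen pre))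
        = (x, pvSumLen pre + (cur.length : Int) + 1
              + min (pos - pvSumLen pre) (nxt.length : Int)) := by
      simp only [pvFinishA, PySem.List.len_eq]
      rw [if_pos (by rw [hdec]; push_cast [List.length_append, List.length_cons]; omega)]
      have hsum : (PySem.List.pyRange 0 ((pre.length : Int) + 1) 1).foldl
          (fun p i => p + PySem.Chars.len (PySem.List.pyGetD (pvLines x.toList) i []) + 1) 0
          = pvSumLen pre + (cur.length : Int) + 1 := by
        rw [hdec, show pre ++ cur :: nxt :: suf' = (pre ++ [cur]) ++ nxt :: suf' by simp,
          show ((pre.length : Int) + 1) = (((pre ++ [cur]).length : Nat) : Int) by simp,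
          pvRangeSum (pre ++ [cur]) (nxt :: suf'), pvSumLen_append_singleton]
      have hget : PySem.List.pyGetD (pvLines x.toList) ((pre.length : Int) + 1) [] = nxt := by
        rw [hdec, show pre ++ cur :: nxt :: suf' = (pre ++ [cur]) ++ nxt :: suf' by simp,
          show ((pre.length : Int) + 1) = (((pre ++ [cur]).length : Nat) : Int) by simp,
          pvGetD_append_cons]
      rw [hsum, hget]
      have hmin : (if pos - pvSumLen pre > PySem.Chars.len nxt
            then pvSumLen pre + (cur.length : Int) + 1 + PySem.Chars.len nxt
            else pvSumLen pre + (cur.length : Int) + 1 + (pos - pvSumLen pre))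
          = pvSumLen pre + (cur.length : Int) + 1 + min (pos - pvSumLen pre) (nxt.length : Int) := by
        rw [PySem.Chars.len_eq]
        split_ifs with hc <;> rw [min_def] <;> split_ifs <;> omega
      rw [← hmin]
    -- B side closed form and conclusion
    rw [hA, hA2, cmd_k_alt]
    simp only [PySem.Str.findFrom_eq, PySem.Str.rfindFrom_eq, PySem.Str.len,
      show ("\n" : String).toList = ['\n'] from rfl, hfind]
    rw [if_neg (by omega), hstart, hnext]

-- ===== VERDICT (by name: the statement is the Claim_ definition above) =====
theorem cmd_k_spec : Claim_equal_cmd_k := by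
  intro x pos _ hpre
  unfold Spec_cmd_k
  exact pvMain x pos (by simpa [Pre_cmd_k, PySem.Str.len] using hpre)
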